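-- pv_equiv track=rewrite | github.com/MrHamdulay/csc3-capstone | examples/data/Assignment_4/hndkay004/boxes.py | get_rectangle
-- ===== SOURCE A (Python) =====
-- def get_rectangle (width,height):
--     x=''
--     a=('*'*width)+'\n'
--     b=''
--     for i in range(height-2):
--         stars='*'+' '*(width-2)+'*'+'\n'
--         b=b+stars
--     c='*'*width
--     x= a+b+c
--     return x
-- ===== SOURCE B (Python) =====
-- def repeat(s, n):
--     # repetition by binary doubling
--     out = ''
--     while n > 0:
--         if n % 2 == 1:
--             out = out + s
--         n //= 2
--         if n:
--             s = s + s
--     return out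
--
-- def get_rectangle(width, height):
--     top = repeat('*', width)
--     mid = '*' + repeat(' ', width - 2) + '*' + '\n'
--     return top + '\n' + repeat(mid, height - 2) + top
-- ===== Notes on version B (the rewrite author's own statement) =====
-- stated objective: alternative
-- what changed: Replaced A's per-row string-accumulation loop (and the built-in repetition it relies on) with a binary-doubling repeat combinator: each repeated block ('*'*width, the spaces, and the stack of middle rows) is built by squaring the string and adding it on the set bits of the count.
import Mathlib
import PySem

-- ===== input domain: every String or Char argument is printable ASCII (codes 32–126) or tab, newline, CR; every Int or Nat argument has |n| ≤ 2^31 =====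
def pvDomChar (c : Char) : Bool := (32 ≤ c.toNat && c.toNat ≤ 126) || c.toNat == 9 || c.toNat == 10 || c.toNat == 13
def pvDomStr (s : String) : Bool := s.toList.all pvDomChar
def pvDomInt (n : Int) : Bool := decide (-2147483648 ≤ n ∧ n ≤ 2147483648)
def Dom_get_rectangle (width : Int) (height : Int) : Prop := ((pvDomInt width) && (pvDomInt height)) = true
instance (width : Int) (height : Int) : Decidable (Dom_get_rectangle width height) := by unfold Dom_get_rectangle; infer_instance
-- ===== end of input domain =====

-- B replaces A's row-accumulation loop (and Python's built-in string repetition) by a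
-- binary-doubling repeat combinator (objective: alternative algorithm).

-- ===== PORT A =====
def get_rectangle (width : Int) (height : Int) : String :=
  let a := PySem.List.pyRepeat ['*'] width ++ ['\n']
  let b := (PySem.List.pyRange 0 (height - 2) 1).foldl
    (fun b _ =>
      let stars := ['*'] ++ PySem.List.pyRepeat [' '] (width - 2) ++ ['*'] ++ ['\n']
      b ++ stars) []
  let c := PySem.List.pyRepeat ['*'] width
  String.mk (a ++ b ++ c)

-- ===== PORT B =====
-- the while-loop of Source B's `repeat` (state: out, s, n); exact transliteration
def pvRepeatLoop (out : List Char) (s : List Char) (n : Int) : List Char :=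
  if 0 < n then
    let out' := if PySem.Int.mod n 2 = 1 then out ++ s else out
    let n' := PySem.Int.floordiv n 2
    pvRepeatLoop out' (if n' ≠ 0 then s ++ s else s) n'
  else out
termination_by n.toNat
decreasing_by
  have h2 : PySem.Int.floordiv n 2 = n / 2 := PySem.Int.floordiv_eq_ediv_of_pos (by norm_num)
  simp only [h2]
  omega

def pvRepeat (s : List Char) (n : Int) : List Char := pvRepeatLoop [] s n

def get_rectangle_alt (width : Int) (height : Int) : String :=
  let top := pvRepeat ['*'] width
  let mid := ['*'] ++ pvRepeat [' '] (width - 2) ++ ['*'] ++ ['\n']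
  String.mk (top ++ ['\n'] ++ pvRepeat mid (height - 2) ++ top)

-- ===== PRECONDITION & SPEC =====
def Spec_get_rectangle (width : Int) (height : Int) (out : String) : Prop := out = get_rectangle_alt width height
instance (width : Int) (height : Int) (out : String) : Decidable (Spec_get_rectangle width height out) := by unfold Spec_get_rectangle; infer_instance

-- ===== CLAIM =====
def Claim_equal_get_rectangle : Prop := ∀ (width : Int) (height : Int), Dom_get_rectangle width height → Spec_get_rectangle width height (get_rectangle width height)

-- ===== LEMMAS AND PROOFS =====

-- A's loop appends the same row each iteration: it is init ++ (row repeated |l| times).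
theorem foldl_const_append {α : Type} (s : List Char) (l : List α) (init : List Char) :
    l.foldl (fun b _ => b ++ s) init = init ++ (List.replicate l.length s).flatten := by
  induction l generalizing init with
  | nil => simp
  | cons x xs ih => simp [List.foldl, ih, List.replicate_succ]

theorem length_pyRange_zero (m : Int) : (PySem.List.pyRange 0 m 1).length = m.toNat := by
  simp [PySem.List.pyRange]; omega

-- doubling the block halves the count
theorem flatten_replicate_double {α : Type} (m : Nat) (s : List α) :
    (List.replicate m (s ++ s)).flatten = (List.replicate (2 * m) s).flatten := by
  induction m with
  | zero => simp
  | succ k ih =>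
      rw [show 2 * (k + 1) = (2 * k) + 1 + 1 from by ring]
      simp [List.replicate_succ, ih, List.append_assoc]

-- appending one more copy commutes with the block of copies
theorem append_flatten_replicate {α : Type} (m : Nat) (s : List α) :
    s ++ (List.replicate m s).flatten = (List.replicate m s).flatten ++ s := by
  induction m with
  | zero => simp
  | succ k ih =>
      simp only [List.replicate_succ, List.flatten_cons, List.append_assoc]
      rw [← ih]

-- correctness of the binary-doubling loop: it appends n copies of s to out
theorem pvRepeatLoop_eq (n : Int) (out s : List Char) :
    pvRepeatLoop out s n = out ++ (List.replicate n.toNat s).flatten := by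
  generalize hk : n.toNat = k
  induction k using Nat.strong_induction_on generalizing n out s with
  | _ k ih =>
    rw [pvRepeatLoop]
    by_cases hpos : 0 < n
    · rw [if_pos hpos]
      have h2 : PySem.Int.floordiv n 2 = n / 2 := PySem.Int.floordiv_eq_ediv_of_pos (by norm_num)
      have hm : PySem.Int.mod n 2 = n % 2 := PySem.Int.mod_eq_emod_of_pos (by norm_num)
      have hlt : (PySem.Int.floordiv n 2).toNat < k := by rw [h2]; omega
      rw [ih _ hlt _ _ _ rfl]
      by_cases hz : PySem.Int.floordiv n 2 ≠ 0
      · rw [if_pos hz]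
        have hcnt : n.toNat = 2 * (PySem.Int.floordiv n 2).toNat + (PySem.Int.mod n 2).toNat := by
          rw [h2, hm]; omega
        by_cases hodd : PySem.Int.mod n 2 = 1
        · rw [if_pos hodd]
          rw [flatten_replicate_double, ← hk, hcnt, hodd]
          rw [show 2 * (PySem.Int.floordiv n 2).toNat + (1 : Int).toNat
                = (2 * (PySem.Int.floordiv n 2).toNat) + 1 from by simp]
          rw [List.replicate_add]
          simp only [List.flatten_append, List.append_assoc, List.replicate_one, List.flatten_cons,
            List.flatten_nil, List.append_nil]
          rw [append_flatten_replicate]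
        · rw [if_neg hodd]
          have he : (PySem.Int.mod n 2).toNat = 0 := by rw [hm]; rw [hm] at hodd; omega
          rw [flatten_replicate_double, ← hk, hcnt, he]
          simp
      · rw [if_neg hz]
        rw [h2] at hz
        have h1 : n = 1 := by omega
        subst h1
        rw [if_pos (by decide), ← hk]
        simp
    · rw [if_neg hpos]
      have : n.toNat = 0 := by omega
      rw [← hk, this]
      simp

-- ===== VERDICT =====
theorem get_rectangle_spec : Claim_equal_get_rectangle := by
  intro width height _
  unfold Spec_get_rectangle get_rectangle get_rectangle_alt pvRepeat
  dsimp only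
  rw [foldl_const_append, length_pyRange_zero]
  rw [pvRepeatLoop_eq, pvRepeatLoop_eq, pvRepeatLoop_eq]
  simp [PySem.List.pyRepeat_singleton, List.flatten_replicate_singleton, List.append_assoc]
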